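-- pv_equiv track=rewrite | github.com/SzymonIwaniuk/wdi-2024-2025 | Zestaw2/zad1A2023.py | zgodne
-- ===== SOURCE A (Python) =====
-- def parami_zgodne(n1, n2):
--     if n1 >= n2:
--         higher = n1
--         lower = n2
--     else:
--         higher = n2
--         lower = n1
--
--     i = 2
--
--     while i <= lower:
--         if lower % i == 0 and higher % i == 0:
--             while higher % i == 0:
--                 higher //= i
--
--             while lower % i == 0:
--                 lower //= i
--
--         i += 1
--
--     if higher == 1 and lower == 1:
--         return True
--     else:
--         return False
--
-- def zgodne(T):
--     N = len(T)
--     counter = 0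
--     for i in range(N):
--
--         for j in range(N):
--
--             if abs(i - j) < 3:
--
--                 if parami_zgodne(T[i], T[j]):
--                     counter += 1
--
--                 #end if
--             #end if
--         #end for
--     #end for
--     return counter // 3
-- ===== SOURCE B (Python) =====
-- # B: gcd-based compatibility test (strip each number by gcds with the other;
-- # compatible iff both strip to 1, i.e. same prime sets) + a single O(N) pass over
-- # the diagonal and offsets +1,+2 (each off-diagonal compatible pair counted twice
-- # by symmetry), instead of A's O(N^2) double loop with trial division up to `lower`.
--
-- def _gcd(a, b):
--     while b > 0:
--         a, b = b, a % b
--     return a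
--
--
-- def parami_zgodne(n1, n2):
--     # compatible <=> n1 and n2 have exactly the same set of prime divisors
--     # (with n1 == n2 == 1 compatible, and any input < 1 incompatible)
--     if n1 < 1 or n2 < 1:
--         return False
--     x = n1
--     g = _gcd(x, n2)
--     while g > 1:
--         x //= g
--         g = _gcd(x, n2)
--     y = n2
--     g = _gcd(y, n1)
--     while g > 1:
--         y //= g
--         g = _gcd(y, n1)
--     return x == 1 and y == 1
--
--
-- def zgodne(T):
--     N = len(T)
--     counter = 0
--     for i in range(N):
--         if parami_zgodne(T[i], T[i]):
--             counter += 1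
--         if i + 1 < N and parami_zgodne(T[i], T[i + 1]):
--             counter += 2
--         if i + 2 < N and parami_zgodne(T[i], T[i + 2]):
--             counter += 2
--     return counter // 3
-- ===== Notes on version B (the rewrite author's own statement) =====
-- stated objective: faster
-- what changed: B replaces A's trial-division compatibility helper (stripping every i up to `lower`) by a gcd-based one (repeatedly dividing each number by its gcd with the other; both reduce to 1 iff they share exactly the same primes), and replaces A's O(N^2) double loop over all index pairs by a single pass over the diagonal and offsets +1,+2, counting each off-diagonal compatible pair twice by symmetry.
import Mathlib
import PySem

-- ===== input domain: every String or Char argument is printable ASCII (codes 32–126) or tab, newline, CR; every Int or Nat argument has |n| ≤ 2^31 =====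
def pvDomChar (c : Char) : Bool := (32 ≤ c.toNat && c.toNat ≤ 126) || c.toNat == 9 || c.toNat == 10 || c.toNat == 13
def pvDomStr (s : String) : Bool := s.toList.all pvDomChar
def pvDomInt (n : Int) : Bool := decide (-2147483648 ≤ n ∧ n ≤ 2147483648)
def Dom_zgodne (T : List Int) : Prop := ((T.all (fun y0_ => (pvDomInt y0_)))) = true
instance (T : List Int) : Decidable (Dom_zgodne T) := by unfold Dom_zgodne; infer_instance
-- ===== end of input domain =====

-- B replaces A's trial-division compatibility helper by a gcd-based one and A's O(N^2)
-- double loop by a single pass over the diagonal and offsets +1,+2 (each off-diagonal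
-- compatible pair counted twice, by symmetry of the compatibility relation).

-- ===== PORT A =====
-- shared module helper parami_zgodne of A.
-- inner 'while x % i == 0: x //= i'; the extra guard conjuncts 2 ≤ i, 1 ≤ x only make the
-- recursion total (they always hold where the Python loop is reached and progresses).
def pzStrip (i x : Int) : Int :=
  if h : PySem.Int.mod x i = 0 ∧ 2 ≤ i ∧ 1 ≤ x then
    pzStrip i (PySem.Int.floordiv x i)
  else x
termination_by x.toNat
decreasing_by
  have h2 : (0:Int) < i := by omega
  rw [PySem.Int.floordiv_eq_ediv_of_pos h2]
  have hx : x / i < x := Int.ediv_lt_of_lt_mul (by omega) (by nlinarith)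
  have hx0 : 0 ≤ x / i := Int.ediv_nonneg (by omega) (by omega)
  omega

theorem pzStrip_le (i x : Int) : pzStrip i x ≤ x := by
  fun_induction pzStrip i x with
  | case1 x h ih =>
    have h2 : (0:Int) < i := by omega
    have hx : x / i < x := Int.ediv_lt_of_lt_mul (by omega) (by nlinarith)
    rw [PySem.Int.floordiv_eq_ediv_of_pos h2] at ih ⊢
    omega
  | case2 x h => omega

-- outer 'while i <= lower' of A's parami_zgodne; returns final (higher, lower)
def pzLoop (i lower higher : Int) : Int × Int :=
  if h : i ≤ lower then
    if PySem.Int.mod lower i = 0 ∧ PySem.Int.mod higher i = 0 then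
      pzLoop (i + 1) (pzStrip i lower) (pzStrip i higher)
    else
      pzLoop (i + 1) lower higher
  else (higher, lower)
termination_by (lower - i + 1).toNat
decreasing_by
  · have := pzStrip_le i lower; omega
  · omega

def parami_zgodne (n1 n2 : Int) : Bool :=
  let higher := if n1 ≥ n2 then n1 else n2
  let lower := if n1 ≥ n2 then n2 else n1
  let p := pzLoop 2 lower higher
  if p.1 = 1 ∧ p.2 = 1 then true else false

-- A's double loop; T[i] is ported as pyGetD with default 0 — exact, since every index
-- produced by range(N) is in range.
def zgodne (T : List Int) : Int :=
  let N : Int := (T.length : Int)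
  let counter : Int :=
    (PySem.List.pyRange 0 N 1).foldl (fun c i =>
      (PySem.List.pyRange 0 N 1).foldl (fun c j =>
        if |i - j| < 3 then
          if parami_zgodne (PySem.List.pyGetD T i 0) (PySem.List.pyGetD T j 0) then c + 1
          else c
        else c) c) 0
  PySem.Int.floordiv counter 3

-- ===== PORT B =====
-- B's Euclid gcd 'while b > 0: a, b = b, a % b' (only ever called with nonnegative arguments)
def pygcd (a b : Int) : Int :=
  if h : 0 < b then pygcd b (PySem.Int.mod a b) else a
termination_by b.natAbs
decreasing_by
  have h0 : 0 ≤ PySem.Int.mod a b := PySem.Int.mod_nonneg a h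
  have h1 : PySem.Int.mod a b < b := PySem.Int.mod_lt a h
  omega

-- B's 'g = gcd(x, b); while g > 1: x //= g; g = gcd(x, b)'; the guard conjunct 1 ≤ x only
-- makes the recursion total (it always holds where B's loop runs).
def gstrip (x b : Int) : Int :=
  if h : 1 < pygcd x b ∧ 1 ≤ x then
    gstrip (PySem.Int.floordiv x (pygcd x b)) b
  else x
termination_by x.toNat
decreasing_by
  have h2 : (0:Int) < pygcd x b := by omega
  rw [PySem.Int.floordiv_eq_ediv_of_pos h2]
  have hx : x / pygcd x b < x := Int.ediv_lt_of_lt_mul (by omega) (by nlinarith)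
  have hx0 : 0 ≤ x / pygcd x b := Int.ediv_nonneg (by omega) (by omega)
  omega

def parami_alt (n1 n2 : Int) : Bool :=
  if n1 < 1 ∨ n2 < 1 then false
  else
    let x := gstrip n1 n2
    let y := gstrip n2 n1
    if x = 1 ∧ y = 1 then true else false

-- B's single pass over the diagonal and the offsets +1, +2
def zgodne_alt (T : List Int) : Int :=
  let N : Int := (T.length : Int)
  let counter : Int :=
    (PySem.List.pyRange 0 N 1).foldl (fun c i =>
      let c := if parami_alt (PySem.List.pyGetD T i 0) (PySem.List.pyGetD T i 0) then c + 1 else c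
      let c := if i + 1 < N ∧ parami_alt (PySem.List.pyGetD T i 0) (PySem.List.pyGetD T (i + 1) 0) then c + 2 else c
      if i + 2 < N ∧ parami_alt (PySem.List.pyGetD T i 0) (PySem.List.pyGetD T (i + 2) 0) then c + 2 else c) 0
  PySem.Int.floordiv counter 3

-- ===== PRECONDITION & SPEC =====
def Spec_zgodne (T : List Int) (out : Int) : Prop := out = zgodne_alt T
instance (T : List Int) (out : Int) : Decidable (Spec_zgodne T out) := by unfold Spec_zgodne; infer_instance

-- ===== CLAIM (what is proved, stated in full; the proofs are below) =====
def Claim_equal_zgodne : Prop := ∀ (T : List Int), Dom_zgodne T → Spec_zgodne T (zgodne T)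

-- ===== LEMMAS AND PROOFS =====

-- the compatibility relation both helpers decide: same set of prime divisors
def pvR (l h : Int) : Prop := ∀ p : ℕ, p.Prime → (((p:Int) ∣ l) ↔ ((p:Int) ∣ h))

theorem pvExistsPrime (x : Int) (hx : 2 ≤ x) : ∃ p : ℕ, p.Prime ∧ (p:Int) ∣ x := by
  obtain ⟨p, hp, hdvd⟩ := Nat.exists_prime_and_dvd (n := x.toNat) (by omega)
  refine ⟨p, hp, ?_⟩
  have h1 : ((x.toNat : ℕ) : Int) = x := Int.toNat_of_nonneg (by omega)
  rw [← h1]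
  exact_mod_cast hdvd

theorem pvEqOne (x : Int) (hx : 1 ≤ x) (h : ∀ p : ℕ, p.Prime → ¬ (p:Int) ∣ x) : x = 1 := by
  by_contra hne
  obtain ⟨p, hp, hd⟩ := pvExistsPrime x (by omega)
  exact h p hp hd

-- ---- pzStrip facts ----
theorem pzStrip_dvd (i x : Int) : pzStrip i x ∣ x := by
  fun_induction pzStrip i x with
  | case1 x h ih =>
    have hdvd : i ∣ x := (PySem.Int.mod_eq_zero_iff_dvd x i).mp h.1
    have hdiv : PySem.Int.floordiv x i = x / i :=
      PySem.Int.floordiv_eq_ediv_of_pos (by omega)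
    rw [hdiv] at ih ⊢
    exact dvd_trans ih ⟨i, (Int.ediv_mul_cancel hdvd).symm⟩
  | case2 x h => exact dvd_refl x

theorem pzStrip_quot (i x : Int) (hi : 2 ≤ i) (hx : 1 ≤ x) (hdvd : i ∣ x) :
    PySem.Int.floordiv x i = x / i ∧ 1 ≤ x / i := by
  obtain ⟨k, hk⟩ := hdvd
  have hk1 : 1 ≤ k := by
    by_contra h'
    have : i * k ≤ 0 := mul_nonpos_of_nonneg_of_nonpos (by omega) (by omega)
    omega
  have hq : x / i = k := by rw [hk]; exact Int.mul_ediv_cancel_left _ (by omega)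
  exact ⟨PySem.Int.floordiv_eq_ediv_of_pos (by omega), by omega⟩

theorem pzStrip_pos (i x : Int) : 2 ≤ i → 1 ≤ x → 1 ≤ pzStrip i x := by
  fun_induction pzStrip i x with
  | case1 x h ih =>
    intro hi hx
    have hdvd : i ∣ x := (PySem.Int.mod_eq_zero_iff_dvd x i).mp h.1
    obtain ⟨hfd, hq⟩ := pzStrip_quot i x hi hx hdvd
    exact ih hi (by rw [hfd]; exact hq)
  | case2 x h => intro _ hx; exact hx

theorem pzStrip_not_dvd (i x : Int) : 2 ≤ i → 1 ≤ x → ¬ (i ∣ pzStrip i x) := by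
  fun_induction pzStrip i x with
  | case1 x h ih =>
    intro hi hx
    have hdvd : i ∣ x := (PySem.Int.mod_eq_zero_iff_dvd x i).mp h.1
    obtain ⟨hfd, hq⟩ := pzStrip_quot i x hi hx hdvd
    exact ih hi (by rw [hfd]; exact hq)
  | case2 x h =>
    intro hi hx hcon
    exact h ⟨(PySem.Int.mod_eq_zero_iff_dvd x i).mpr hcon, hi, hx⟩

theorem pzStrip_prime_dvd (i x : Int) (p : ℕ) (hp : p.Prime) (hpi : ¬ ((p:Int) ∣ i)) :
    2 ≤ i → 1 ≤ x → (((p:Int) ∣ pzStrip i x) ↔ ((p:Int) ∣ x)) := by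
  have hpInt : Prime ((p:ℕ) : Int) := Nat.prime_iff_prime_int.mp hp
  fun_induction pzStrip i x with
  | case1 x h ih =>
    intro hi hx
    have hdvd : i ∣ x := (PySem.Int.mod_eq_zero_iff_dvd x i).mp h.1
    obtain ⟨hfd, hq⟩ := pzStrip_quot i x hi hx hdvd
    rw [ih hi (by rw [hfd]; exact hq), hfd]
    constructor
    · intro hd
      exact dvd_trans hd ⟨i, (Int.ediv_mul_cancel hdvd).symm⟩
    · intro hd
      have hx' : x = i * (x / i) := (Int.mul_ediv_cancel' hdvd).symm
      rcases hpInt.dvd_mul.mp (hx' ▸ hd) with h1 | h1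
      · exact absurd h1 hpi
      · exact h1
  | case2 x h => intro _ _; exact Iff.rfl

-- ---- the outer loop of A decides pvR ----
theorem pzDone (i l h : Int) (hl : 1 ≤ l) (hh : 1 ≤ h)
    (hinv : ∀ p : ℕ, p.Prime → (p:Int) < i → ¬(((p:Int) ∣ l) ∧ ((p:Int) ∣ h)))
    (hil : l < i) :
    (((h, l) : Int × Int) = (1, 1) ↔ pvR l h) := by
  rw [Prod.mk.injEq]
  constructor
  · rintro ⟨h1, l1⟩
    subst h1; subst l1
    intro p _; exact Iff.rfl
  · intro hR
    have hl1 : l = 1 := by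
      by_contra hne
      obtain ⟨p, hp, hpd⟩ := pvExistsPrime l (by omega)
      have hle : (p:Int) ≤ l := Int.le_of_dvd (by omega) hpd
      exact hinv p hp (by omega) ⟨hpd, (hR p hp).mp hpd⟩
    have hh1 : h = 1 := by
      subst hl1
      refine pvEqOne h hh (fun p hp hpd => ?_)
      have hd1 : (p:Int) ∣ 1 := (hR p hp).mpr hpd
      have h2 : (2:Int) ≤ (p:Int) := by exact_mod_cast hp.two_le
      have := Int.le_of_dvd one_pos hd1
      omega
    exact ⟨hh1, hl1⟩

theorem pzLoop_char : ∀ (n : ℕ) (i l h : Int), (l + 1 - i).toNat ≤ n → 2 ≤ i → 1 ≤ l → 1 ≤ h →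
    (∀ p : ℕ, p.Prime → (p:Int) < i → ¬(((p:Int) ∣ l) ∧ ((p:Int) ∣ h))) →
    (pzLoop i l h = (1, 1) ↔ pvR l h) := by
  intro n
  induction n with
  | zero =>
    intro i l h hm hi hl hh hinv
    rw [pzLoop, dif_neg (show ¬ i ≤ l by omega)]
    exact pzDone i l h hl hh hinv (by omega)
  | succ m ih =>
    intro i l h hm hi hl hh hinv
    rw [pzLoop]
    by_cases hil : i ≤ l
    · rw [dif_pos hil]
      by_cases hc : PySem.Int.mod l i = 0 ∧ PySem.Int.mod h i = 0
      · rw [if_pos hc]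
        have hdl : i ∣ l := (PySem.Int.mod_eq_zero_iff_dvd l i).mp hc.1
        have hdh : i ∣ h := (PySem.Int.mod_eq_zero_iff_dvd h i).mp hc.2
        -- i is prime (its natAbs is): any smaller prime factor would be a common prime < i
        have hiP : i.toNat.Prime ∧ ((i.toNat : ℕ) : Int) = i := by
          have hcast : ((i.toNat : ℕ) : Int) = i := Int.toNat_of_nonneg (by omega)
          obtain ⟨q, hq, hqd⟩ := pvExistsPrime i (by omega)
          have hqle : (q:Int) ≤ i := Int.le_of_dvd (by omega) hqd
          rcases eq_or_lt_of_le hqle with heq | hlt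
          · have : q = i.toNat := by omega
            exact ⟨this ▸ hq, hcast⟩
          · exact absurd ⟨dvd_trans hqd hdl, dvd_trans hqd hdh⟩ (hinv q hq hlt)
        obtain ⟨hiPrime, hiCast⟩ := hiP
        have hl' : 1 ≤ pzStrip i l := pzStrip_pos i l hi hl
        have hh' : 1 ≤ pzStrip i h := pzStrip_pos i h hi hh
        have hmeas : (pzStrip i l + 1 - (i + 1)).toNat ≤ m := by
          have := pzStrip_le i l; omega
        have hinv' : ∀ p : ℕ, p.Prime → (p:Int) < i + 1 →
            ¬(((p:Int) ∣ pzStrip i l) ∧ ((p:Int) ∣ pzStrip i h)) := by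
          intro p hp hplt ⟨hd1, hd2⟩
          rcases eq_or_lt_of_le (show (p:Int) ≤ i by omega) with heq | hlt
          · exact pzStrip_not_dvd i l hi hl (heq ▸ hd1)
          · exact hinv p hp hlt ⟨dvd_trans hd1 (pzStrip_dvd i l), dvd_trans hd2 (pzStrip_dvd i h)⟩
        rw [ih (i + 1) (pzStrip i l) (pzStrip i h) hmeas (by omega) hl' hh' hinv']
        -- pvR is preserved by stripping the common prime i from both sides
        have hcase : ∀ p : ℕ, p.Prime → (p:Int) ∣ i → ((p:ℕ):Int) = i := by
          intro p hp hpd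
          have : p ∣ i.toNat := by
            rw [← hiCast] at hpd; exact_mod_cast hpd
          have := (Nat.prime_dvd_prime_iff_eq hp hiPrime).mp this
          omega
        constructor
        · intro hR p hp
          by_cases hpi : (p:Int) ∣ i
          · have heq := hcase p hp hpi
            constructor
            · intro _; exact heq ▸ hdh
            · intro _; exact heq ▸ hdl
          · rw [← pzStrip_prime_dvd i l p hp hpi hi hl,
                ← pzStrip_prime_dvd i h p hp hpi hi hh]
            exact hR p hp
        · intro hR p hp
          by_cases hpi : (p:Int) ∣ i
          · have heq := hcase p hp hpi
            constructor
            · intro hcon; exact absurd (heq ▸ hcon) (pzStrip_not_dvd i l hi hl)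
            · intro hcon; exact absurd (heq ▸ hcon) (pzStrip_not_dvd i h hi hh)
          · rw [pzStrip_prime_dvd i l p hp hpi hi hl,
                pzStrip_prime_dvd i h p hp hpi hi hh]
            exact hR p hp
      · rw [if_neg hc]
        refine ih (i + 1) l h (by omega) (by omega) hl hh ?_
        intro p hp hplt hpd
        rcases eq_or_lt_of_le (show (p:Int) ≤ i by omega) with heq | hlt
        · exact hc ⟨(PySem.Int.mod_eq_zero_iff_dvd l i).mpr (heq ▸ hpd.1),
            (PySem.Int.mod_eq_zero_iff_dvd h i).mpr (heq ▸ hpd.2)⟩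
        · exact hinv p hp hlt hpd
    · rw [dif_neg hil]
      exact pzDone i l h hl hh hinv (by omega)

theorem parami_char (n1 n2 : Int) :
    parami_zgodne n1 n2 = true ↔ (1 ≤ n1 ∧ 1 ≤ n2 ∧ pvR n1 n2) := by
  have key : ∀ l h : Int, l ≤ h →
      (((pzLoop 2 l h).1 = 1 ∧ (pzLoop 2 l h).2 = 1) ↔ (1 ≤ l ∧ 1 ≤ h ∧ pvR l h)) := by
    intro l h hlh
    by_cases hl : 1 ≤ l
    · have hh : 1 ≤ h := le_trans hl hlh
      have hinv : ∀ p : ℕ, p.Prime → (p:Int) < 2 → ¬(((p:Int) ∣ l) ∧ ((p:Int) ∣ h)) := by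
        intro p hp hplt _
        have : (2:Int) ≤ (p:Int) := by exact_mod_cast hp.two_le
        omega
      have hchar := pzLoop_char ((l + 1 - 2).toNat) 2 l h (le_refl _) (by omega) hl hh hinv
      rw [Prod.ext_iff] at hchar
      rw [hchar]
      constructor
      · intro hR; exact ⟨hl, hh, hR⟩
      · intro hR; exact hR.2.2
    · rw [pzLoop, dif_neg (show ¬ (2:Int) ≤ l by omega)]
      constructor
      · rintro ⟨_, h2⟩; omega
      · rintro ⟨h1, _⟩; omega
  unfold parami_zgodne
  by_cases hge : n1 ≥ n2
  · simp only [hge, if_true]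
    constructor
    · intro hif
      by_cases hcond : (pzLoop 2 n2 n1).1 = 1 ∧ (pzLoop 2 n2 n1).2 = 1
      · have := (key n2 n1 hge).mp hcond
        exact ⟨this.2.1, this.1, fun p hp => (this.2.2 p hp).symm⟩
      · simp [if_neg hcond] at hif
    · intro ⟨h1, h2, hR⟩
      rw [if_pos ((key n2 n1 hge).mpr ⟨h2, h1, fun p hp => (hR p hp).symm⟩)]
  · simp only [hge, if_false]
    have hlt : n1 ≤ n2 := by omega
    constructor
    · intro hif
      by_cases hcond : (pzLoop 2 n1 n2).1 = 1 ∧ (pzLoop 2 n1 n2).2 = 1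
      · have := (key n1 n2 hlt).mp hcond
        exact ⟨this.1, this.2.1, this.2.2⟩
      · simp [if_neg hcond] at hif
    · intro ⟨h1, h2, hR⟩
      rw [if_pos ((key n1 n2 hlt).mpr ⟨h1, h2, hR⟩)]

-- ---- pygcd is a greatest common divisor ----
theorem pygcd_spec (a b : Int) : 0 ≤ a → 0 ≤ b →
    (0 ≤ pygcd a b ∧ pygcd a b ∣ a ∧ pygcd a b ∣ b ∧
      ∀ c : Int, c ∣ a → c ∣ b → c ∣ pygcd a b) := by
  fun_induction pygcd a b with
  | case1 a b hb ih =>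
    intro _ _
    have hm0 : 0 ≤ PySem.Int.mod a b := PySem.Int.mod_nonneg a hb
    have hme : PySem.Int.mod a b = a % b := PySem.Int.mod_eq_emod_of_pos hb
    obtain ⟨hg0, hgb, hgm, hgr⟩ := ih (by omega) hm0
    refine ⟨hg0, ?_, hgb, ?_⟩
    · have h1 : pygcd b (PySem.Int.mod a b) ∣ b * (a / b) + a % b :=
        dvd_add (Dvd.dvd.mul_right hgb _) (hme ▸ hgm)
      rwa [Int.mul_ediv_add_emod] at h1
    · intro c hca hcb
      refine hgr c hcb ?_
      rw [hme, Int.emod_def]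
      exact dvd_sub hca (Dvd.dvd.mul_right hcb _)
  | case2 a b hb =>
    intro ha hb0
    exact ⟨ha, dvd_refl a, by rw [show b = 0 by omega]; exact dvd_zero a,
      fun c hca _ => hca⟩

-- ---- gstrip x b = 1 iff every prime of x divides b ----
theorem gstrip_char (x b : Int) : 1 ≤ x → 1 ≤ b →
    (gstrip x b = 1 ↔ ∀ p : ℕ, p.Prime → (p:Int) ∣ x → (p:Int) ∣ b) := by
  fun_induction gstrip x b with
  | case1 x h ih =>
    intro hx hb
    obtain ⟨hg0, hgx, hgb, _⟩ := pygcd_spec x b (by omega) (by omega)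
    have hg2 : 2 ≤ pygcd x b := by omega
    obtain ⟨hfd, hq⟩ := pzStrip_quot (pygcd x b) x hg2 hx hgx
    rw [ih (by rw [hfd]; exact hq) hb]
    have hxeq : x = pygcd x b * (x / pygcd x b) := (Int.mul_ediv_cancel' hgx).symm
    constructor
    · intro hall p hp hpx
      have hpInt : Prime ((p:ℕ) : Int) := Nat.prime_iff_prime_int.mp hp
      rcases hpInt.dvd_mul.mp (hxeq ▸ hpx) with h1 | h1
      · exact dvd_trans h1 hgb
      · exact hall p hp (hfd ▸ h1)
    · intro hall p hp hpx
      refine hall p hp ?_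
      rw [hfd] at hpx
      exact dvd_trans hpx ⟨pygcd x b, (Int.ediv_mul_cancel hgx).symm⟩
  | case2 x h =>
    intro hx hb
    obtain ⟨hg0, hgx, hgb, hgr⟩ := pygcd_spec x b (by omega) (by omega)
    have hg1 : pygcd x b = 1 := by
      have hne : pygcd x b ≠ 0 := by
        intro h0
        have := zero_dvd_iff.mp (h0 ▸ hgx)
        omega
      have : ¬ 1 < pygcd x b := fun hcon => h ⟨hcon, hx⟩
      omega
    constructor
    · intro h1 p hp hpx
      rw [h1] at hpx
      have h2 : (2:Int) ≤ (p:Int) := by exact_mod_cast hp.two_le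
      have := Int.le_of_dvd one_pos hpx
      omega
    · intro hall
      refine pvEqOne x hx (fun p hp hpx => ?_)
      have := hgr (p:Int) hpx (hall p hp hpx)
      rw [hg1] at this
      have h2 : (2:Int) ≤ (p:Int) := by exact_mod_cast hp.two_le
      have := Int.le_of_dvd one_pos this
      omega

theorem parami_alt_char (n1 n2 : Int) :
    parami_alt n1 n2 = true ↔ (1 ≤ n1 ∧ 1 ≤ n2 ∧ pvR n1 n2) := by
  unfold parami_alt
  by_cases hneg : n1 < 1 ∨ n2 < 1
  · rw [if_pos hneg]
    constructor
    · intro hcon; exact absurd hcon (by simp)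
    · intro ⟨h1, h2, _⟩; omega
  · rw [if_neg hneg]
    have h1 : 1 ≤ n1 := by omega
    have h2 : 1 ≤ n2 := by omega
    constructor
    · intro hif
      by_cases hcond : (∀ p : ℕ, p.Prime → (p:Int) ∣ n1 → (p:Int) ∣ n2) ∧
          (∀ p : ℕ, p.Prime → (p:Int) ∣ n2 → (p:Int) ∣ n1)
      · exact ⟨h1, h2, fun p hp => ⟨hcond.1 p hp, hcond.2 p hp⟩⟩
      · rw [if_neg] at hif
        · exact absurd hif (by simp)
        · intro ⟨ha, hb⟩
          exact hcond ⟨(gstrip_char n1 n2 h1 h2).mp ha, (gstrip_char n2 n1 h2 h1).mp hb⟩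
    · intro ⟨_, _, hR⟩
      rw [if_pos ⟨(gstrip_char n1 n2 h1 h2).mpr (fun p hp => (hR p hp).mp),
        (gstrip_char n2 n1 h2 h1).mpr (fun p hp => (hR p hp).mpr)⟩]

theorem parami_funext : parami_alt = parami_zgodne := by
  funext a b
  rw [Bool.eq_iff_iff, parami_alt_char, parami_char]

theorem parami_zgodne_comm (a b : Int) : parami_zgodne a b = parami_zgodne b a := by
  unfold parami_zgodne
  by_cases h1 : a ≥ b <;> by_cases h2 : b ≥ a <;> simp [h1, h2]
  · have : a = b := le_antisymm h2 h1
    subst this; rfl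
  · omega

-- the pairing function of both loops, over Nat indices
def pvG (T : List Int) (i j : Nat) : Int :=
  if |(i : Int) - (j : Int)| < 3 then
    if parami_zgodne (PySem.List.pyGetD T (i : Int) 0) (PySem.List.pyGetD T (j : Int) 0) then 1
    else 0
  else 0

theorem pvG_comm (T : List Int) (i j : Nat) : pvG T i j = pvG T j i := by
  unfold pvG
  rw [abs_sub_comm, parami_zgodne_comm]

theorem pvG_loc (T : List Int) (i j : Nat) (h : i + 3 ≤ j) : pvG T i j = 0 := by
  unfold pvG
  rw [if_neg]
  rw [not_lt]
  have : (i : Int) + 3 ≤ (j : Int) := by exact_mod_cast h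
  rw [abs_sub_comm]
  calc (3 : Int) ≤ (j : Int) - i := by omega
    _ ≤ |(j : Int) - i| := le_abs_self _

-- evaluation of the right tail of one row under locality
theorem pvHighEval (g : Nat → Nat → Int) (hloc : ∀ i j, i + 3 ≤ j → g i j = 0)
    (i n : Nat) :
    ∑ j ∈ Finset.Ico (i + 1) n, g i j
      = (if i + 1 < n then g i (i + 1) else 0) + (if i + 2 < n then g i (i + 2) else 0) := by
  rcases Nat.lt_or_ge (i + 2) n with h2 | h2
  · have hsplit : Finset.Ico (i + 1) n = {i + 1, i + 2} ∪ Finset.Ico (i + 3) n := by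
      ext x
      simp only [Finset.mem_Ico, Finset.mem_union, Finset.mem_insert, Finset.mem_singleton]
      omega
    have hdisj : Disjoint ({i + 1, i + 2} : Finset Nat) (Finset.Ico (i + 3) n) := by
      apply Finset.disjoint_left.mpr
      intro x hx hx2
      simp only [Finset.mem_insert, Finset.mem_singleton] at hx
      simp only [Finset.mem_Ico] at hx2
      omega
    rw [hsplit, Finset.sum_union hdisj, Finset.sum_pair (show i + 1 ≠ i + 2 by omega),
      Finset.sum_eq_zero (fun j hj => hloc i j (by simp only [Finset.mem_Ico] at hj; omega)),
      if_pos (show i + 1 < n by omega), if_pos h2]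
    ring
  · rcases Nat.lt_or_ge (i + 1) n with h1 | h1
    · have : Finset.Ico (i + 1) n = {i + 1} := by
        ext x; simp only [Finset.mem_Ico, Finset.mem_singleton]; omega
      rw [this, Finset.sum_singleton, if_pos h1, if_neg (show ¬ i + 2 < n by omega)]
      ring
    · have : Finset.Ico (i + 1) n = ∅ := by
        ext x; simp only [Finset.mem_Ico, Finset.notMem_empty, iff_false]; omega
      rw [this, Finset.sum_empty, if_neg (show ¬ i + 1 < n by omega),
        if_neg (show ¬ i + 2 < n by omega)]
      ring

-- evaluation of the left tail of one row under locality (of the transpose)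
theorem pvLowEval (g : Nat → Nat → Int) (hloc : ∀ i j, j + 3 ≤ i → g i j = 0) (i : Nat) :
    ∑ j ∈ Finset.range i, g i j
      = (if 1 ≤ i then g i (i - 1) else 0) + (if 2 ≤ i then g i (i - 2) else 0) := by
  rcases Nat.lt_or_ge i 2 with h2 | h2
  · interval_cases i <;> simp
  · have hsplit : Finset.range i = Finset.range (i - 2) ∪ {i - 2, i - 1} := by
      ext x
      simp only [Finset.mem_range, Finset.mem_union, Finset.mem_insert, Finset.mem_singleton]
      omega
    have hdisj : Disjoint (Finset.range (i - 2)) ({i - 2, i - 1} : Finset Nat) := by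
      apply Finset.disjoint_right.mpr
      intro x hx hx2
      simp only [Finset.mem_insert, Finset.mem_singleton] at hx
      simp only [Finset.mem_range] at hx2
      omega
    rw [hsplit, Finset.sum_union hdisj, Finset.sum_pair (show i - 2 ≠ i - 1 by omega),
      Finset.sum_eq_zero (fun j hj => hloc i j (by simp only [Finset.mem_range] at hj; omega)),
      if_pos (show 1 ≤ i by omega), if_pos h2]
    ring

-- shift: the collected left tails equal the collected right tails
theorem pvShift (g : Nat → Nat → Int) (hsym : ∀ i j, g i j = g j i) (n : Nat) :
    ∑ i ∈ Finset.range n, ((if 1 ≤ i then g i (i - 1) else 0) + (if 2 ≤ i then g i (i - 2) else 0))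
      = ∑ i ∈ Finset.range n,
          ((if i + 1 < n then g i (i + 1) else 0) + (if i + 2 < n then g i (i + 2) else 0)) := by
  rw [Finset.sum_add_distrib, Finset.sum_add_distrib]
  congr 1
  · -- offset 1
    match n with
    | 0 => simp
    | Nat.succ m =>
      rw [Finset.sum_range_succ' (fun i => if 1 ≤ i then g i (i - 1) else 0) m]
      rw [Finset.sum_range_succ (fun i => if i + 1 < m + 1 then g i (i + 1) else 0) m]
      rw [if_neg (show ¬ (1 : Nat) ≤ 0 by omega), if_neg (show ¬ m + 1 < m + 1 by omega),
        add_zero, add_zero]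
      apply Finset.sum_congr rfl
      intro i hi
      simp only [Finset.mem_range] at hi
      rw [if_pos (show 1 ≤ i + 1 by omega), if_pos (show i + 1 < m + 1 by omega)]
      simp only [Nat.add_sub_cancel]
      exact hsym (i + 1) i
  · -- offset 2
    match n with
    | 0 => simp
    | 1 => simp
    | Nat.succ (Nat.succ m) =>
      rw [Finset.sum_range_succ' (fun i => if 2 ≤ i then g i (i - 2) else 0) (m + 1)]
      rw [Finset.sum_range_succ' (fun i => if 2 ≤ i + 1 then g (i + 1) (i + 1 - 2) else 0) m]
      rw [Finset.sum_range_succ (fun i => if i + 2 < m + 2 then g i (i + 2) else 0) (m + 1)]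
      rw [Finset.sum_range_succ (fun i => if i + 2 < m + 2 then g i (i + 2) else 0) m]
      rw [if_neg (show ¬ (2 : Nat) ≤ 0 by omega), if_neg (show ¬ (2 : Nat) ≤ 0 + 1 by omega),
        if_neg (show ¬ m + 1 + 2 < m + 2 by omega), if_neg (show ¬ m + 2 < m + 2 by omega),
        add_zero, add_zero, add_zero, add_zero]
      apply Finset.sum_congr rfl
      intro i hi
      simp only [Finset.mem_range] at hi
      rw [if_pos (show 2 ≤ i + 1 + 1 by omega), if_pos (show i + 2 < m + 2 by omega)]
      rw [show i + 1 + 1 - 2 = i by omega]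
      exact hsym (i + 2) i

-- the central identity: the full double sum equals the diagonal-plus-doubled-window sum
theorem pvKey (g : Nat → Nat → Int) (hsym : ∀ i j, g i j = g j i)
    (hloc : ∀ i j, i + 3 ≤ j → g i j = 0) (n : Nat) :
    ∑ i ∈ Finset.range n, ∑ j ∈ Finset.range n, g i j
      = ∑ i ∈ Finset.range n,
          (g i i + (if i + 1 < n then 2 * g i (i + 1) else 0)
            + (if i + 2 < n then 2 * g i (i + 2) else 0)) := by
  have hloc' : ∀ i j, j + 3 ≤ i → g i j = 0 := fun i j h => (hsym i j).trans (hloc j i h)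
  have hstep : ∀ i ∈ Finset.range n,
      ∑ j ∈ Finset.range n, g i j
        = ((if 1 ≤ i then g i (i - 1) else 0) + (if 2 ≤ i then g i (i - 2) else 0))
          + (g i i
          + ((if i + 1 < n then g i (i + 1) else 0) + (if i + 2 < n then g i (i + 2) else 0))) := by
    intro i hi
    simp only [Finset.mem_range] at hi
    have hsplit : Finset.range n = Finset.range i ∪ ({i} ∪ Finset.Ico (i + 1) n) := by
      ext x
      simp only [Finset.mem_range, Finset.mem_union, Finset.mem_singleton, Finset.mem_Ico]
      omega
    have hd1 : Disjoint ({i} : Finset Nat) (Finset.Ico (i + 1) n) := by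
      apply Finset.disjoint_left.mpr
      intro x hx hx2
      simp only [Finset.mem_singleton] at hx
      simp only [Finset.mem_Ico] at hx2
      omega
    have hd2 : Disjoint (Finset.range i) (({i} : Finset Nat) ∪ Finset.Ico (i + 1) n) := by
      apply Finset.disjoint_left.mpr
      intro x hx hx2
      simp only [Finset.mem_range] at hx
      simp only [Finset.mem_union, Finset.mem_singleton, Finset.mem_Ico] at hx2
      omega
    rw [hsplit, Finset.sum_union hd2, Finset.sum_union hd1, Finset.sum_singleton,
      pvLowEval g hloc' i, pvHighEval g hloc i n]
  rw [Finset.sum_congr rfl hstep]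
  rw [Finset.sum_add_distrib, pvShift g hsym n, ← Finset.sum_add_distrib]
  apply Finset.sum_congr rfl
  intro i _
  split_ifs <;> ring

-- A's counter as a double sum of pvG
theorem pvCounterA (T : List Int) :
    (PySem.List.pyRange 0 (T.length : Int) 1).foldl (fun c i =>
      (PySem.List.pyRange 0 (T.length : Int) 1).foldl (fun c j =>
        if |i - j| < 3 then
          if parami_zgodne (PySem.List.pyGetD T i 0) (PySem.List.pyGetD T j 0) then c + 1
          else c
        else c) c) 0
      = ∑ i ∈ Finset.range T.length, ∑ j ∈ Finset.range T.length, pvG T i j := by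
  rw [PySem.List.pyRange_zero_natCast, List.foldl_map]
  have hinner : ∀ (c : Int) (i : Nat),
      List.foldl (fun (c : Int) (j : Int) =>
        if |(i : Int) - j| < 3 then
          if parami_zgodne (PySem.List.pyGetD T (i : Int) 0) (PySem.List.pyGetD T j 0) then c + 1
          else c
        else c) c (List.map (fun k : Nat => (k : Int)) (List.range T.length))
        = c + ∑ j ∈ Finset.range T.length, pvG T i j := by
    intro c i
    rw [List.foldl_map]
    have hfun : (fun (c : Int) (j : Nat) =>
        if |(i : Int) - (j : Int)| < 3 then
          if parami_zgodne (PySem.List.pyGetD T (i : Int) 0) (PySem.List.pyGetD T (j : Int) 0) then c + 1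
          else c
        else c) = fun c j => c + pvG T i j := by
      funext c j
      unfold pvG
      split_ifs <;> simp
    rw [hfun, PySem.List.foldl_add (List.range T.length) (pvG T i) c]
    rfl
  have houter : (fun (c : Int) (i : Nat) =>
      List.foldl (fun (c : Int) (j : Int) =>
        if |(i : Int) - j| < 3 then
          if parami_zgodne (PySem.List.pyGetD T (i : Int) 0) (PySem.List.pyGetD T j 0) then c + 1
          else c
        else c) c (List.map (fun k : Nat => (k : Int)) (List.range T.length)))
      = fun c i => c + ∑ j ∈ Finset.range T.length, pvG T i j := by
    funext c i
    exact hinner c i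
  rw [houter, PySem.List.foldl_add (List.range T.length)
    (fun i => ∑ j ∈ Finset.range T.length, pvG T i j) 0, zero_add]
  rfl

-- B's counter (with parami_alt already rewritten to parami_zgodne) as a single sum
theorem pvCounterB (T : List Int) :
    (PySem.List.pyRange 0 (T.length : Int) 1).foldl (fun c i =>
      let c := if parami_zgodne (PySem.List.pyGetD T i 0) (PySem.List.pyGetD T i 0) then c + 1 else c
      let c := if i + 1 < (T.length : Int) ∧ parami_zgodne (PySem.List.pyGetD T i 0) (PySem.List.pyGetD T (i + 1) 0) then c + 2 else c
      if i + 2 < (T.length : Int) ∧ parami_zgodne (PySem.List.pyGetD T i 0) (PySem.List.pyGetD T (i + 2) 0) then c + 2 else c) 0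
      = ∑ i ∈ Finset.range T.length,
          (pvG T i i + (if i + 1 < T.length then 2 * pvG T i (i + 1) else 0)
            + (if i + 2 < T.length then 2 * pvG T i (i + 2) else 0)) := by
  rw [PySem.List.pyRange_zero_natCast, List.foldl_map]
  have hbody : (fun (c : Int) (i : Nat) =>
      let c := if parami_zgodne (PySem.List.pyGetD T (i : Int) 0) (PySem.List.pyGetD T (i : Int) 0) then c + 1 else c
      let c := if (i : Int) + 1 < (T.length : Int) ∧ parami_zgodne (PySem.List.pyGetD T (i : Int) 0) (PySem.List.pyGetD T ((i : Int) + 1) 0) then c + 2 else c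
      if (i : Int) + 2 < (T.length : Int) ∧ parami_zgodne (PySem.List.pyGetD T (i : Int) 0) (PySem.List.pyGetD T ((i : Int) + 2) 0) then c + 2 else c)
      = fun c i => c +
          (pvG T i i + (if i + 1 < T.length then 2 * pvG T i (i + 1) else 0)
            + (if i + 2 < T.length then 2 * pvG T i (i + 2) else 0)) := by
    funext c i
    have gd : pvG T i i
        = if parami_zgodne (PySem.List.pyGetD T (i : Int) 0) (PySem.List.pyGetD T (i : Int) 0) then 1 else 0 := by
      unfold pvG
      rw [if_pos (by simp)]
    have g1 : pvG T i (i + 1)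
        = if parami_zgodne (PySem.List.pyGetD T (i : Int) 0) (PySem.List.pyGetD T ((i : Int) + 1) 0) then 1 else 0 := by
      unfold pvG
      rw [show ((i + 1 : Nat) : Int) = (i : Int) + 1 by push_cast; ring]
      rw [if_pos (by rw [show (i : Int) - ((i : Int) + 1) = -1 by ring]; norm_num)]
    have g2 : pvG T i (i + 2)
        = if parami_zgodne (PySem.List.pyGetD T (i : Int) 0) (PySem.List.pyGetD T ((i : Int) + 2) 0) then 1 else 0 := by
      unfold pvG
      rw [show ((i + 2 : Nat) : Int) = (i : Int) + 2 by push_cast; ring]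
      rw [if_pos (by rw [show (i : Int) - ((i : Int) + 2) = -2 by ring]; norm_num)]
    have l1 : ((i : Int) + 1 < (T.length : Int)) = (i + 1 < T.length) := by
      apply propext
      constructor <;> intro h <;> exact_mod_cast h
    have l2 : ((i : Int) + 2 < (T.length : Int)) = (i + 2 < T.length) := by
      apply propext
      constructor <;> intro h <;> exact_mod_cast h
    have step : ∀ (P Q1 Q2 : Prop) [Decidable P] [Decidable Q1] [Decidable Q2] (c : Int),
        (let a := if P then c + 1 else c
         let b := if Q1 then a + 2 else a
         if Q2 then b + 2 else b)
          = c + ((if P then (1 : Int) else 0) + (if Q1 then 2 else 0) + (if Q2 then 2 else 0)) := by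
      intro P Q1 Q2 _ _ _ c
      dsimp only
      split_ifs <;> ring
    have andsplit : ∀ (A B : Prop) [Decidable A] [Decidable B],
        (if A ∧ B then (2 : Int) else 0) = if A then 2 * (if B then 1 else 0) else 0 := by
      intro A B _ _
      by_cases hA : A <;> by_cases hB : B <;> simp [hA, hB]
    rw [step, andsplit, andsplit]
    simp only [gd, g1, g2, l1, l2]
  rw [hbody, PySem.List.foldl_add (List.range T.length) _ 0, zero_add]
  rfl

-- ===== VERDICT (by name: the statement is the Claim_ definition above) =====
theorem zgodne_spec : Claim_equal_zgodne := by
  intro T _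
  unfold Spec_zgodne zgodne zgodne_alt
  rw [parami_funext]
  simp only
  rw [pvCounterA T, pvCounterB T, pvKey (pvG T) (pvG_comm T) (pvG_loc T)]
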